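-- pv_equiv track=rewrite | github.com/wyk18703232953/myResearch | codeComplex/data/filteredData/python/quadratic/python_quadratic_0134.py | generate_grids
-- ===== SOURCE A (Python) =====
-- def generate_grids(n):
--     grids = []
--     for g in range(4):
--         grid = []
--         for i in range(n):
--             row = []
--             for j in range(n):
--                 val = ((g + 1) * (i + 1) * (j + 1)) % 2
--                 row.append(val)
--             grid.append(row)
--         grids.append(grid)
--     return grids
-- ===== SOURCE B (Python) =====
-- def generate_grids(n):
--     # A cell is 1 exactly when g, i and j are all even, so build the two
--     # distinct grid shapes once from two prototype rows and reuse them.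
--     # (Rows/grids are shared objects; the returned VALUE equals A's.)
--     pattern = [1 - j % 2 for j in range(n)]   # 1 at even j, 0 at odd j
--     zeros = [0] * n
--     even_grid = [pattern if i % 2 == 0 else zeros for i in range(n)]
--     odd_grid = [zeros for _ in range(n)]
--     return [even_grid, odd_grid, even_grid, odd_grid]
-- ===== Notes on version B (the rewrite author's own statement) =====
-- stated objective: alternative
-- what changed: Replaces the per-cell modular-product triple loop with two prototype rows (parity pattern and zeros) assembled into two prototype grids that are reused for the four outputs.
import Mathlib
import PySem

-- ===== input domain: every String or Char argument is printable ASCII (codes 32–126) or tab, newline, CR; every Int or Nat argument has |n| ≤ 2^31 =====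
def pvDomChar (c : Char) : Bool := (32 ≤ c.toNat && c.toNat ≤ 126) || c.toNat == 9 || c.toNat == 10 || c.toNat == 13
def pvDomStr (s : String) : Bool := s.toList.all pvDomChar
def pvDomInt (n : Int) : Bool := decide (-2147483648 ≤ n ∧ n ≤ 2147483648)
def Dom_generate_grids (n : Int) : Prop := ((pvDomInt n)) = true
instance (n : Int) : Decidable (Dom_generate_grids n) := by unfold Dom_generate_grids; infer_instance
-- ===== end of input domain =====

-- B builds two prototype rows and two prototype grids and reuses them instead of
-- evaluating the modular product per cell (return-value equivalence; B shares row objects).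

-- ===== PORT A =====
def generate_grids (n : Int) : List (List (List Int)) :=
  (PySem.List.pyRange 0 4 1).foldl (fun grids g =>
    grids ++ [(PySem.List.pyRange 0 n 1).foldl (fun grid i =>
      grid ++ [(PySem.List.pyRange 0 n 1).foldl (fun row j =>
        row ++ [PySem.Int.mod ((g + 1) * (i + 1) * (j + 1)) 2]) []]) []]) []

-- ===== PORT B =====
def generate_grids_alt (n : Int) : List (List (List Int)) :=
  let pattern := (PySem.List.pyRange 0 n 1).map (fun j => 1 - PySem.Int.mod j 2)
  let zeros := PySem.List.pyRepeat [0] n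
  let even_grid := (PySem.List.pyRange 0 n 1).map (fun i =>
    if PySem.Int.mod i 2 = 0 then pattern else zeros)
  let odd_grid := (PySem.List.pyRange 0 n 1).map (fun _ => zeros)
  [even_grid, odd_grid, even_grid, odd_grid]

-- ===== PRECONDITION & SPEC =====
def Spec_generate_grids (n : Int) (out : List (List (List Int))) : Prop := out = generate_grids_alt n
instance (n : Int) (out : List (List (List Int))) : Decidable (Spec_generate_grids n out) := by unfold Spec_generate_grids; infer_instance

-- ===== CLAIM (what is proved, stated in full; the proofs are below) =====
def Claim_equal_generate_grids : Prop := ∀ (n : Int), Dom_generate_grids n → Spec_generate_grids n (generate_grids n)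

-- ===== LEMMAS AND PROOFS =====

theorem pv_mod2 (x : Int) : PySem.Int.mod x 2 = x % 2 :=
  PySem.Int.mod_eq_emod_of_pos (by norm_num)

theorem pv_cell_odd_even (a i j : Int) (ha : a % 2 = 1) (hi : i % 2 = 0) :
    (a * (i + 1) * (j + 1)) % 2 = 1 - j % 2 := by
  rw [Int.mul_emod, Int.mul_emod a, ha]
  have h1 : (i + 1) % 2 = 1 := by omega
  rw [h1]
  omega

theorem pv_cell_odd_odd (a i j : Int) (ha : a % 2 = 1) (hi : i % 2 = 1) :
    (a * (i + 1) * (j + 1)) % 2 = 0 := by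
  rw [Int.mul_emod, Int.mul_emod a, ha]
  have h1 : (i + 1) % 2 = 0 := by omega
  rw [h1]
  omega

theorem pv_cell_even (a i j : Int) (ha : a % 2 = 0) :
    (a * (i + 1) * (j + 1)) % 2 = 0 := by
  rw [Int.mul_emod, Int.mul_emod a, ha]
  simp

theorem pv_map_zeros (n : Int) (f : Int → Int)
    (h : ∀ j ∈ PySem.List.pyRange 0 n 1, f j = 0) :
    (PySem.List.pyRange 0 n 1).map f = PySem.List.pyRepeat [0] n := by
  rw [PySem.List.pyRepeat_singleton, List.eq_replicate_iff]
  constructor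
  · simp [PySem.List.length_pyRange_one]
  · intro b hb
    rcases List.mem_map.1 hb with ⟨j, hj, rfl⟩
    exact h j hj

theorem pv_grid_odd (n a : Int) (ha : a % 2 = 1) :
    (PySem.List.pyRange 0 n 1).map (fun i => (PySem.List.pyRange 0 n 1).map (fun j =>
      PySem.Int.mod (a * (i + 1) * (j + 1)) 2)) =
    (PySem.List.pyRange 0 n 1).map (fun i =>
      if PySem.Int.mod i 2 = 0 then
        (PySem.List.pyRange 0 n 1).map (fun j => 1 - PySem.Int.mod j 2)
      else PySem.List.pyRepeat [0] n) := by
  apply List.map_congr_left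
  intro i _
  by_cases hi : i % 2 = 0
  · rw [if_pos (by rw [pv_mod2]; exact hi)]
    apply List.map_congr_left
    intro j _
    rw [pv_mod2, pv_mod2, pv_cell_odd_even a i j ha hi]
  · have hi1 : i % 2 = 1 := by omega
    rw [if_neg (by rw [pv_mod2]; omega)]
    apply pv_map_zeros
    intro j _
    rw [pv_mod2, pv_cell_odd_odd a i j ha hi1]

theorem pv_grid_even (n a : Int) (ha : a % 2 = 0) :
    (PySem.List.pyRange 0 n 1).map (fun i => (PySem.List.pyRange 0 n 1).map (fun j =>
      PySem.Int.mod (a * (i + 1) * (j + 1)) 2)) =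
    (PySem.List.pyRange 0 n 1).map (fun _ => PySem.List.pyRepeat [0] n) := by
  apply List.map_congr_left
  intro i _
  apply pv_map_zeros
  intro j _
  rw [pv_mod2, pv_cell_even a i j ha]

-- ===== VERDICT (by name: the statement is the Claim_ definition above) =====
theorem generate_grids_spec : Claim_equal_generate_grids := by
  intro n _
  unfold Spec_generate_grids generate_grids generate_grids_alt
  simp only [PySem.List.foldl_append_singleton_eq_map, List.nil_append]
  have h4 : PySem.List.pyRange 0 4 1 = [0, 1, 2, 3] := by decide
  rw [h4]
  simp only [List.map_cons, List.map_nil, List.cons.injEq, and_true]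
  exact ⟨pv_grid_odd n (0 + 1) (by decide), pv_grid_even n (1 + 1) (by decide),
    pv_grid_odd n (2 + 1) (by decide), pv_grid_even n (3 + 1) (by decide)⟩
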